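-- pv_equiv track=rewrite | github.com/EliasAroni2000/automatas | Aroni-tp1-v2.py | tokenDobleIgual
-- ===== SOURCE A (Python) =====
-- estado_final = "estado final"
--
-- estadoNoFinal = "estado no aceptado"
--
-- estadoTrampa = "estado trampa"
--
-- def tokenDobleIgual(lexema):
--     estado = 0
--     estadoFinal = [2]
--     caracter = {0:{'=':1},1:{'=':2},2:{}}
--     for c in lexema:
--         if c in caracter[estado]:
--             estado = caracter[estado][c]
--         else:
--             estado = -1
--             break
--     if estado == -1:
--         return estadoTrampa
--     if estado in estadoFinal:
--         return estado_final
--     else: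
--         return estadoNoFinal
-- ===== SOURCE B (Python) =====
-- estado_final = "estado final"
--
-- estadoNoFinal = "estado no aceptado"
--
-- estadoTrampa = "estado trampa"
--
-- def tokenDobleIgual(lexema):
--     # Direct classification against the fixed token "==": no DFA state or transition table.
--     if lexema == "==":
--         return estado_final
--     if lexema == "" or lexema == "=":
--         return estadoNoFinal
--     return estadoTrampa
-- ===== Notes on version B (the rewrite author's own statement) =====
-- stated objective: simpler
-- what changed: Replaced the DFA state variable and nested transition dictionary with a direct comparison of the whole string against the fixed token '==' and its proper prefixes '' and '='.
import Mathlib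
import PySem

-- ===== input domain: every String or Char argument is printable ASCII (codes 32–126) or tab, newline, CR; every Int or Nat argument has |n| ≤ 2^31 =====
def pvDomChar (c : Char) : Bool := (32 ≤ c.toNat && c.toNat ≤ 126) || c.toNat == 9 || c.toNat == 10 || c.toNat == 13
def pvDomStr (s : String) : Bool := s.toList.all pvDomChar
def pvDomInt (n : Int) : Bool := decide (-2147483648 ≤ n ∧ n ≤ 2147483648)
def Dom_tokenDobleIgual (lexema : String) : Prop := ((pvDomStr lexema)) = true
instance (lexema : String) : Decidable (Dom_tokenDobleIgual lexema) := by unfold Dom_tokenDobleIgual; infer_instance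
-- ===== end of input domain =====

-- B replaces A's DFA state/transition-dict loop by a direct comparison of the whole
-- string against "==" and its proper prefixes (objective: simpler).

-- ===== PORT A =====
-- caracter = {0:{'=':1},1:{'=':2},2:{}}
def pvCaracter : PySem.Dict Int (PySem.Dict Char Int) :=
  PySem.Dict.ofList
    [(0, PySem.Dict.ofList [('=', 1)]),
     (1, PySem.Dict.ofList [('=', 2)]),
     (2, PySem.Dict.ofList [])]

-- the 'for c in lexema' loop with 'estado = -1; break' on a missing transition
def pvLoopA (estado : Int) : List Char → Int
  | [] => estado
  | c :: cs =>
    match PySem.Dict.get? (PySem.Dict.getD pvCaracter estado (PySem.Dict.ofList [])) c with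
    | some s => pvLoopA s cs
    | none => -1

def tokenDobleIgual (lexema : String) : String :=
  let estado := pvLoopA 0 lexema.toList
  if estado = -1 then "estado trampa"
  else if estado ∈ [(2 : Int)] then "estado final"
  else "estado no aceptado"

-- ===== PORT B =====
def tokenDobleIgual_alt (lexema : String) : String :=
  if lexema = "==" then "estado final"
  else if lexema = "" ∨ lexema = "=" then "estado no aceptado"
  else "estado trampa"

-- ===== PRECONDITION & SPEC =====
def Spec_tokenDobleIgual (lexema : String) (out : String) : Prop := out = tokenDobleIgual_alt lexema
instance (lexema : String) (out : String) : Decidable (Spec_tokenDobleIgual lexema out) := by unfold Spec_tokenDobleIgual; infer_instance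

-- ===== CLAIM (what is proved, stated in full; the proofs are below) =====
def Claim_equal_tokenDobleIgual : Prop := ∀ (lexema : String), Dom_tokenDobleIgual lexema → Spec_tokenDobleIgual lexema (tokenDobleIgual lexema)

-- ===== LEMMAS AND PROOFS =====

theorem string_eq_iff_toList (s t : String) : s = t ↔ s.toList = t.toList := by
  constructor
  · intro h; rw [h]
  · intro h; exact String.ext (by simpa [String.toList] using h)

theorem pv_getD0 : PySem.Dict.getD pvCaracter 0 (PySem.Dict.ofList []) = PySem.Dict.ofList [('=', 1)] := by decide

theorem pv_getD1 : PySem.Dict.getD pvCaracter 1 (PySem.Dict.ofList []) = PySem.Dict.ofList [('=', 2)] := by decide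

theorem pv_getD2 : PySem.Dict.getD pvCaracter 2 (PySem.Dict.ofList []) = PySem.Dict.ofList [] := by decide

theorem pv_inner_get (n : Int) (c : Char) :
    PySem.Dict.get? (PySem.Dict.ofList [('=', n)]) c = if c = '=' then some n else none := by
  have h : PySem.Dict.ofList [('=', n)] = PySem.Dict.insert PySem.Dict.empty '=' n := rfl
  rw [h, PySem.Dict.get?_insert, PySem.Dict.get?_empty]

theorem main_lemma (l : List Char) :
    (if pvLoopA 0 l = -1 then "estado trampa"
     else if pvLoopA 0 l ∈ [(2 : Int)] then "estado final"
     else "estado no aceptado")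
    = (if l = ['=', '='] then "estado final"
       else if l = [] ∨ l = ['='] then "estado no aceptado"
       else "estado trampa") := by
  match l with
  | [] => decide
  | [c] =>
    by_cases h : c = '='
    · subst h; decide
    · simp [pvLoopA, pv_getD0, pv_inner_get, h]
  | c :: d :: rest =>
    by_cases hc : c = '='
    · subst hc
      by_cases hd : d = '='
      · subst hd
        match rest with
        | [] => decide
        | e :: rs =>
          have he : (PySem.Dict.ofList ([] : List (Char × Int))).get? e = none := PySem.Dict.get?_empty e
          simp [pvLoopA, pv_getD0, pv_getD1, pv_getD2, pv_inner_get, he]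
      · simp [pvLoopA, pv_getD0, pv_getD1, pv_inner_get, hd]
    · simp [pvLoopA, pv_getD0, pv_inner_get, hc]

-- ===== VERDICT (by name: the statement is the Claim_ definition above) =====
theorem tokenDobleIgual_spec : Claim_equal_tokenDobleIgual := by
  intro lexema _
  unfold Spec_tokenDobleIgual tokenDobleIgual tokenDobleIgual_alt
  simp only [string_eq_iff_toList lexema "==", string_eq_iff_toList lexema "",
    string_eq_iff_toList lexema "="]
  have h1 : ("==" : String).toList = ['=', '='] := by decide
  have h2 : ("" : String).toList = [] := by decide
  have h3 : ("=" : String).toList = ['='] := by decide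
  rw [h1, h2, h3]
  exact main_lemma lexema.toList
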